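-- pv_equiv track=rewrite | github.com/miliar/Code_Jam_Webscraper | solutions_python/Problem_36/375.py | noccur
-- ===== SOURCE A (Python) =====
-- magic="welcome to code jam"
--
-- mod=10000
--
-- def noccur(s):
-- 	'''Find the number of occurrences of magic as a subsequence of s'''
-- 	dp=(len(magic)+1)*[0]
-- 	dp[0]=1
-- 	for c in s:
-- 		for i in range(1, 1+len(magic)):
-- 			if c==magic[i-1]:
-- 				dp[i]+=dp[i-1]
-- 				dp[i]%=mod
-- 	return dp[len(magic)]
-- ===== SOURCE B (Python) =====
-- magic = "welcome to code jam"
--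
-- mod = 10000
--
-- def noccur(s):
--     '''Find the number of occurrences of magic as a subsequence of s'''
--     # Transposed DP: ways[p] = (#occurrences of the processed magic prefix
--     # as a subsequence of s[:p]) mod 10000, rebuilt once per magic character.
--     ways = [1] * (len(s) + 1)
--     for ch in magic:
--         new = [0]
--         for c, w in zip(s, ways):
--             new.append((new[-1] + (w if c == ch else 0)) % mod)
--         ways = new
--     return ways[-1]
-- ===== Notes on version B (the rewrite author's own statement) =====
-- stated objective: alternative
-- what changed: A sweeps a 20-entry magic-prefix DP vector in place (ascending, mod only on match) once per character of s; B transposes the DP: it rebuilds a (len(s)+1)-entry array of prefix counts once per magic character via an append-only scan over zip(s, ways), with the mod applied on every append.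
import Mathlib
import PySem

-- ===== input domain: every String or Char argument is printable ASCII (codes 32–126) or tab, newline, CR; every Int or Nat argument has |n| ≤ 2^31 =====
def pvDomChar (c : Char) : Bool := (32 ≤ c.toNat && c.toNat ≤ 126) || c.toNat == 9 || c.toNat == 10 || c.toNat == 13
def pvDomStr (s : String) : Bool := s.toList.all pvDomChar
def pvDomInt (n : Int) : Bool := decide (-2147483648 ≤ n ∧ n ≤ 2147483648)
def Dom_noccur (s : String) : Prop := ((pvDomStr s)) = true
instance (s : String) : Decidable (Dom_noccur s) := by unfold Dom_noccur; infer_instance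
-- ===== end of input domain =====

-- B transposes the DP: instead of sweeping a 20-entry magic-prefix vector in place for
-- each character of s, it rebuilds an (len(s)+1)-entry prefix-count array once per magic
-- character; an alternative decomposition of the same count, proved to return the same value.

def pvMagic : List Char := "welcome to code jam".toList
def pvMod : Int := 10000

-- ===== PORT A =====
def noccur (s : String) : Int :=
  let dp0 : List Int := PySem.List.pySetD (List.replicate (pvMagic.length + 1) 0) 0 1
  let dp := s.toList.foldl (fun dp c =>
    (PySem.List.pyRange 1 (1 + (pvMagic.length : Int)) 1).foldl (fun dp i =>
      if c = PySem.List.pyGetD pvMagic (i - 1) ' ' then          -- index 0 ≤ i-1 < 19: in range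
        PySem.List.pySetD dp i (PySem.Int.mod (PySem.List.pyGetD dp i 0 + PySem.List.pyGetD dp (i - 1) 0) pvMod)
      else dp) dp) dp0
  PySem.List.pyGetD dp (pvMagic.length : Int) 0

-- ===== PORT B =====
def noccur_alt (s : String) : Int :=
  let sL := s.toList
  let ways0 : List Int := List.replicate (sL.length + 1) 1
  let ways := pvMagic.foldl (fun ways ch =>
    (sL.zip ways).foldl (fun new cw =>
      new ++ [PySem.Int.mod (PySem.List.pyGetD new (-1) 0 + (if cw.1 = ch then cw.2 else 0)) pvMod]) [0]) ways0
  PySem.List.pyGetD ways (-1) 0      -- new/ways are never empty: new starts as [0]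

-- ===== PRECONDITION & SPEC =====
def Spec_noccur (s : String) (out : Int) : Prop := out = noccur_alt s
instance (s : String) (out : Int) : Decidable (Spec_noccur s out) := by unfold Spec_noccur; infer_instance

-- ===== CLAIM (what is proved, stated in full; the proofs are below) =====
def Claim_equal_noccur : Prop := ∀ (s : String), Dom_noccur s → Spec_noccur s (noccur s)

-- ===== LEMMAS AND PROOFS =====

-- Reference count: Mrev i r = (#occurrences of pvMagic[:i] as a subsequence of r.reverse) mod 10000,
-- where r is the REVERSED processed prefix of s.
def Mrev : Nat → List Char → Int
  | 0, _ => 1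
  | _+1, [] => 0
  | i+1, c :: r => if c = pvMagic.getD i ' ' then (Mrev (i+1) r + Mrev i r) % 10000 else Mrev (i+1) r

lemma Mrev_bounds : ∀ (r : List Char) (i : Nat), 0 ≤ Mrev i r ∧ Mrev i r < 10000 := by
  intro r
  induction r with
  | nil => intro i; cases i <;> simp [Mrev]
  | cons c r ih =>
    intro i
    cases i with
    | zero => simp [Mrev]
    | succ i =>
      simp only [Mrev]
      split
      · exact ⟨Int.emod_nonneg _ (by norm_num), Int.emod_lt_of_pos _ (by norm_num)⟩
      · exact ih (i+1)

lemma Mrev_emod (r : List Char) (i : Nat) : Mrev i r % 10000 = Mrev i r :=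
  Int.emod_eq_of_lt (Mrev_bounds r i).1 (Mrev_bounds r i).2

lemma pvMagic_length : pvMagic.length = 19 := by decide

-- no two adjacent characters of pvMagic are equal (this is what makes A's ascending in-place sweep correct)
lemma pvMagic_adj (k : Nat) (h1 : 1 ≤ k) (h2 : k ≤ 18) : pvMagic.getD k ' ' ≠ pvMagic.getD (k-1) ' ' := by
  interval_cases k <;> decide


lemma mapRange_getD (f : Nat → Int) (n j : Nat) (hj : j < n) :
    ((List.range n).map f).getD j 0 = f j := by
  simp [List.getD_eq_getElem?_getD, hj]

lemma mapRange_getLast (g : Nat → Int) (n : Nat) (h : ((List.range (n+1)).map g) ≠ []) :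
    ((List.range (n+1)).map g).getLast h = g n := by
  rw [List.getLast_eq_getElem]; simp

lemma mapRange_getD_self (dp : List Int) (h : dp.length = 20) :
    (List.range 20).map (fun j => dp.getD j 0) = dp := by
  apply List.ext_getElem
  · simp [h]
  · intro i hi _
    simp only [List.getElem_map, List.getElem_range, List.getD_eq_getElem?_getD,
      List.getElem?_eq_getElem (show i < dp.length by omega)]
    rfl

-- ---- A side ----

def stepA (c : Char) (dp : List Int) : List Int :=
  (PySem.List.pyRange 1 (1 + (pvMagic.length : Int)) 1).foldl (fun dp i =>
    if c = PySem.List.pyGetD pvMagic (i - 1) ' ' then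
      PySem.List.pySetD dp i (PySem.Int.mod (PySem.List.pyGetD dp i 0 + PySem.List.pyGetD dp (i - 1) 0) pvMod)
    else dp) dp

lemma noccur_eq_fold (s : String) :
    noccur s = PySem.List.pyGetD (s.toList.foldl (fun dp c => stepA c dp)
      (PySem.List.pySetD (List.replicate (pvMagic.length + 1) 0) 0 1)) (pvMagic.length : Int) 0 := rfl

-- partial inner sweep: after processing indices 1..k, entries 1..k are updated, the rest untouched
lemma stepA_partial (c : Char) (dp : List Int) (hlen : dp.length = 20) :
    ∀ k : Nat, k ≤ 19 →
      (PySem.List.pyRange 1 (1 + (k : Int)) 1).foldl (fun dp i =>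
        if c = PySem.List.pyGetD pvMagic (i - 1) ' ' then
          PySem.List.pySetD dp i (PySem.Int.mod (PySem.List.pyGetD dp i 0 + PySem.List.pyGetD dp (i - 1) 0) pvMod)
        else dp) dp =
      (List.range 20).map (fun j =>
        if 1 ≤ j ∧ j ≤ k ∧ c = pvMagic.getD (j-1) ' ' then
          (dp.getD j 0 + dp.getD (j-1) 0) % 10000 else dp.getD j 0) := by
  intro k
  induction k with
  | zero =>
    intro _
    rw [PySem.List.pyRange_one_eq_nil (by omega)]
    simp only [List.foldl_nil]
    rw [show (List.range 20).map (fun j =>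
        if 1 ≤ j ∧ j ≤ 0 ∧ c = pvMagic.getD (j-1) ' ' then
          (dp.getD j 0 + dp.getD (j-1) 0) % 10000 else dp.getD j 0)
      = (List.range 20).map (fun j => dp.getD j 0) from
        List.map_congr_left (by intro j _; rw [if_neg (by omega)])]
    exact (mapRange_getD_self dp hlen).symm
  | succ k ih =>
    intro hk
    have hk' : k ≤ 19 := by omega
    rw [show (1 + ((k+1 : Nat) : Int)) = (1 + (k : Int)) + 1 by omega,
        PySem.List.pyRange_one_succ_right (by omega), List.foldl_append, ih hk']
    set R := (List.range 20).map (fun j =>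
        if 1 ≤ j ∧ j ≤ k ∧ c = pvMagic.getD (j-1) ' ' then
          (dp.getD j 0 + dp.getD (j-1) 0) % 10000 else dp.getD j 0) with hR
    simp only [List.foldl_cons, List.foldl_nil]
    have hcast : (1 + (k : Int)) = ((k+1 : Nat) : Int) := by push_cast; ring
    have hcast' : (1 + (k : Int)) - 1 = ((k : Nat) : Int) := by omega
    rw [hcast', PySem.List.pyGetD_natCast pvMagic]
    by_cases hc : c = pvMagic.getD k ' '
    · rw [if_pos hc]
      have hRk1 : R.getD (k+1) 0 = dp.getD (k+1) 0 := by
        rw [hR, mapRange_getD _ 20 (k+1) (by omega), if_neg (by omega)]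
      have hRk : R.getD k 0 = dp.getD k 0 := by
        rcases Nat.eq_zero_or_pos k with h0 | hpos
        · subst h0; rw [hR, mapRange_getD _ 20 0 (by omega), if_neg (by omega)]
        · rw [hR, mapRange_getD _ 20 k (by omega), if_neg]
          rintro ⟨_, _, hcc⟩
          exact pvMagic_adj k hpos (by omega) (hc ▸ hcc ▸ rfl)
      rw [hcast, PySem.List.pyGetD_natCast R, PySem.List.pyGetD_natCast R,
          PySem.List.pySetD_natCast]
      rw [hRk1, hRk]
      have hRlen : R.length = 20 := by rw [hR]; simp
      apply List.ext_getElem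
      · simp [hRlen]
      · intro j hj _
        have hjR : j < R.length := by simpa using hj
        have hj20 : j < 20 := by omega
        rw [List.getElem_set]
        by_cases hjk : k + 1 = j
        · subst hjk
          rw [if_pos rfl]
          simp only [List.getElem_map, List.getElem_range]
          rw [if_pos ⟨by omega, le_rfl, by simpa using hc⟩]
          rw [PySem.Int.mod_eq_emod_of_pos (show (0:Int) < pvMod by decide)]
          rfl
        · rw [if_neg hjk]
          rw [← List.getD_eq_getElem R 0 hjR]
          simp only [List.getElem_map, List.getElem_range]
          rw [hR, mapRange_getD _ 20 j hj20]
          by_cases hle : j ≤ k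
          · by_cases hP : c = pvMagic.getD (j-1) ' '
            · by_cases h1 : 1 ≤ j
              · rw [if_pos ⟨h1, hle, hP⟩, if_pos ⟨h1, by omega, hP⟩]
              · rw [if_neg (by omega), if_neg (by omega)]
            · rw [if_neg (by tauto), if_neg (by tauto)]
          · rw [if_neg (by omega), if_neg (by omega)]
    · rw [if_neg hc]
      rw [hR]
      apply List.map_congr_left
      intro j hj
      simp only [List.mem_range] at hj
      by_cases hle : j ≤ k
      · by_cases hP : c = pvMagic.getD (j-1) ' '
        · by_cases h1 : 1 ≤ j
          · rw [if_pos ⟨h1, hle, hP⟩, if_pos ⟨h1, by omega, hP⟩]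
          · rw [if_neg (by omega), if_neg (by omega)]
        · rw [if_neg (by tauto), if_neg (by tauto)]
      · by_cases hjk : j = k + 1
        · subst hjk
          rw [if_neg (by omega), if_neg]
          rintro ⟨_, _, hcc⟩
          exact hc (by simpa using hcc)
        · rw [if_neg (by omega), if_neg (by omega)]

lemma stepA_char (c : Char) (r : List Char) :
    stepA c ((List.range 20).map (fun i => Mrev i r)) = (List.range 20).map (fun i => Mrev i (c :: r)) := by
  unfold stepA
  rw [show ((pvMagic.length : Int)) = ((19 : Nat) : Int) by rw [pvMagic_length]]
  rw [stepA_partial c _ (by simp) 19 le_rfl]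
  apply List.map_congr_left
  intro j hj
  simp only [List.mem_range] at hj
  have hD : ∀ m, m < 20 → ((List.range 20).map (fun i => Mrev i r)).getD m 0 = Mrev m r :=
    fun m hm => mapRange_getD _ 20 m hm
  cases j with
  | zero => rw [if_neg (by omega)]; simp [Mrev]
  | succ i =>
    simp only [Nat.add_sub_cancel]
    rw [hD (i+1) hj, hD i (by omega)]
    simp only [Mrev]
    by_cases hc : c = pvMagic.getD i ' '
    · rw [if_pos ⟨by omega, by omega, hc⟩, if_pos hc]
    · rw [if_neg (by tauto), if_neg hc]

lemma A_invariant (cs : List Char) :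
    cs.foldl (fun dp c => stepA c dp) (PySem.List.pySetD (List.replicate (pvMagic.length + 1) 0) 0 1) =
      (List.range 20).map (fun i => Mrev i cs.reverse) := by
  induction cs using List.reverseRecOn with
  | nil => decide
  | append_singleton cs c ih =>
    rw [List.foldl_append, ih]
    simpa using stepA_char c cs.reverse

-- ---- B side ----

def stepB (sL : List Char) (ways : List Int) (ch : Char) : List Int :=
  (sL.zip ways).foldl (fun new cw =>
    new ++ [PySem.Int.mod (PySem.List.pyGetD new (-1) 0 + (if cw.1 = ch then cw.2 else 0)) pvMod]) [0]

def W (sL : List Char) (i : Nat) : List Int :=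
  (List.range (sL.length + 1)).map (fun p => Mrev i (sL.take p).reverse)

lemma stepB_char (sL : List Char) (i : Nat) :
    stepB sL (W sL i) (pvMagic.getD i ' ') = W sL (i+1) := by
  have hzlen : (sL.zip (W sL i)).length = sL.length := by simp [W]
  have key : ∀ p, p ≤ sL.length →
      ((sL.zip (W sL i)).take p).foldl (fun new cw =>
        new ++ [PySem.Int.mod (PySem.List.pyGetD new (-1) 0 +
          (if cw.1 = pvMagic.getD i ' ' then cw.2 else 0)) pvMod]) [0]
      = (List.range (p+1)).map (fun q => Mrev (i+1) (sL.take q).reverse) := by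
    intro p
    induction p with
    | zero => intro _; simp [Mrev]
    | succ p ihp =>
      intro hp
      have hp' : p ≤ sL.length := by omega
      have hpz : p < (sL.zip (W sL i)).length := by omega
      rw [List.take_add_one, List.getElem?_eq_getElem hpz]
      rw [List.foldl_append, ihp hp']
      simp only [Option.toList_some, List.foldl_cons, List.foldl_nil]
      have hpair : (sL.zip (W sL i))[p] = (sL[p], Mrev i (sL.take p).reverse) := by
        rw [List.getElem_zip]
        simp [W]
        rfl
      rw [hpair]
      dsimp only
      have hne : ((List.range (p+1)).map (fun q => Mrev (i+1) (sL.take q).reverse)) ≠ [] := by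
        simp
      rw [PySem.List.pyGetD_neg_one (h := hne), mapRange_getLast]
      have htake : (sL.take (p+1)).reverse = sL[p] :: (sL.take p).reverse := by
        rw [List.take_add_one, List.getElem?_eq_getElem (by omega)]
        simp
      conv_rhs => rw [show p+1+1 = (p+1)+1 from rfl, List.range_succ, List.map_append, List.map_singleton]
      congr 1
      rw [htake]
      simp only [Mrev]
      rw [PySem.Int.mod_eq_emod_of_pos (show (0:Int) < pvMod by decide)]
      by_cases hc : sL[p] = pvMagic.getD i ' '
      · rw [if_pos hc, if_pos hc]; norm_num [pvMod]
      · rw [if_neg hc, if_neg hc, add_zero]; norm_num [pvMod, Mrev_emod]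
  have hfull := key sL.length le_rfl
  rw [List.take_of_length_le (le_of_eq hzlen)] at hfull
  unfold stepB
  rw [hfull]
  rfl

lemma B_invariant (sL : List Char) :
    ∀ (suf pre : List Char), pre ++ suf = pvMagic →
      suf.foldl (fun ways ch => stepB sL ways ch) (W sL pre.length) = W sL 19 := by
  intro suf
  induction suf with
  | nil => intro pre h; simp at h; rw [h] at *; simp [pvMagic_length]
  | cons ch suf ih =>
    intro pre h
    have hch : ch = pvMagic.getD pre.length ' ' := by
      rw [← h]; simp [List.getD_eq_getElem?_getD]
    have : stepB sL (W sL pre.length) ch = W sL (pre.length + 1) := by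
      rw [hch]; exact stepB_char sL pre.length
    simp only [List.foldl_cons, this]
    have := ih (pre ++ [ch]) (by simpa using h)
    simpa using this

lemma W_zero (sL : List Char) : W sL 0 = List.replicate (sL.length + 1) 1 := by
  simp [W, Mrev, List.map_const']

-- ===== VERDICT (by name: the statement is the Claim_ definition above) =====
theorem noccur_spec : Claim_equal_noccur := by
  intro s _
  unfold Spec_noccur
  have hA : noccur s = Mrev 19 s.toList.reverse := by
    rw [noccur_eq_fold, A_invariant s.toList,
        show ((pvMagic.length : Int)) = ((19 : Nat) : Int) by rw [pvMagic_length],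
        PySem.List.pyGetD_natCast, mapRange_getD _ 20 19 (by omega)]
  have hB : noccur_alt s = Mrev 19 s.toList.reverse := by
    have h := B_invariant s.toList pvMagic [] rfl
    simp only [List.length_nil] at h
    show PySem.List.pyGetD (pvMagic.foldl (fun ways ch => stepB s.toList ways ch)
      (List.replicate (s.toList.length + 1) 1)) (-1) 0 = _
    rw [← W_zero, h]
    have hne : W s.toList 19 ≠ [] := by simp [W]
    rw [PySem.List.pyGetD_neg_one (h := hne)]
    unfold W at hne ⊢
    rw [mapRange_getLast, List.take_length]
  rw [hA, hB]
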